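-- pv_equiv track=rewrite | github.com/fferegrino/MagInkMirror | src/maginkmirror/contrib/plugins/notion/plugin.py | _merge_column_order
-- ===== SOURCE A (Python) =====
-- def _merge_column_order(schema_order: list[str], seen: set[str], configured: list[str] | None) -> list[str]:
--     out: list[str] = []
--     if configured:
--         for name in configured:
--             if name in seen and name not in out:
--                 out.append(name)
--     for name in schema_order:
--         if name in seen and name not in out:
--             out.append(name)
--     rest = sorted(s for s in seen if s not in out)
--     out.extend(rest)
--     return out
-- ===== SOURCE B (Python) =====
-- def _merge_column_order(schema_order: list[str], seen: set[str], configured: list[str] | None) -> list[str]: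
--     cfg = configured or []
--     rank: dict[str, int] = {}
--     for i, name in enumerate(cfg):
--         if name not in rank:
--             rank[name] = i
--     for j, name in enumerate(schema_order, len(cfg)):
--         if name not in rank:
--             rank[name] = j
--     sentinel = len(cfg) + len(schema_order)
--     return sorted(seen, key=lambda s: (rank.get(s, sentinel), "" if s in rank else s))
-- ===== Notes on version B (the rewrite author's own statement) =====
-- stated objective: faster
-- what changed: Replaces the three append passes with their linear 'name not in out' inner scans by a first-occurrence rank map over configured++schema_order and a single key-based sort of seen (key = (rank, tie-name)).
import Mathlib
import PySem

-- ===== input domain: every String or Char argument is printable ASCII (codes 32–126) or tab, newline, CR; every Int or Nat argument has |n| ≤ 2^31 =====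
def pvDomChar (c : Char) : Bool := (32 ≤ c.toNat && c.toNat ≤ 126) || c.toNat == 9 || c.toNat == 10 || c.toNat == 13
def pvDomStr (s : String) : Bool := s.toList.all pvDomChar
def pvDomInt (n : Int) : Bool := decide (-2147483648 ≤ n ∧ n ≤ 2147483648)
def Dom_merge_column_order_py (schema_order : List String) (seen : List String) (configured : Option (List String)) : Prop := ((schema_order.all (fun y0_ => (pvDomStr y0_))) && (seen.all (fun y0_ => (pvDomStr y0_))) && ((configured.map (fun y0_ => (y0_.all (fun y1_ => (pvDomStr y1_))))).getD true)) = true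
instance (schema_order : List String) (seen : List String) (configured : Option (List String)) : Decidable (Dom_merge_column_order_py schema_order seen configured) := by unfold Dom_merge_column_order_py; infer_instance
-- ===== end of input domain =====

-- B replaces A's three append passes (each with a linear 'name not in out' scan) by a first-occurrence
-- rank map over configured++schema_order and ONE key-based sort of seen; return values proved equal.

-- ===== PORT A =====
-- the shared loop body of A's two 'for name in …: if name in seen and name not in out: out.append(name)' passes
def pvStepA (seen : List String) (out : List String) (name : String) : List String :=
  if name ∈ seen ∧ name ∉ out then out ++ [name] else out

def merge_column_order_py (schema_order : List String) (seen : List String) (configured : Option (List String)) : List String :=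
  let out0 : List String := []
  -- 'if configured:' — truthy only for a non-None, non-empty list
  let out1 : List String :=
    match configured with
    | some cfg => if cfg ≠ [] then cfg.foldl (pvStepA seen) out0 else out0
    | none => out0
  let out2 : List String := schema_order.foldl (pvStepA seen) out1
  let rest : List String := PySem.List.sorted (seen.filter (fun s => decide (s ∉ out2))) (fun s => s)
  out2 ++ rest

-- ===== PORT B =====
-- 'if name not in rank: rank[name] = i' over an enumerate
def pvRankStep (d : PySem.Dict String Int) (p : Int × String) : PySem.Dict String Int :=
  if (d.get? p.2).isSome then d else d.insert p.2 p.1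

def merge_column_order_py_alt (schema_order : List String) (seen : List String) (configured : Option (List String)) : List String :=
  let cfg : List String := configured.getD []   -- 'configured or []'
  let rank1 : PySem.Dict String Int := (PySem.List.enumerate cfg 0).foldl pvRankStep PySem.Dict.empty
  let rank : PySem.Dict String Int := (PySem.List.enumerate schema_order (cfg.length : Int)).foldl pvRankStep rank1
  let sentinel : Int := (cfg.length : Int) + (schema_order.length : Int)
  PySem.List.sorted2 seen (fun s => (rank.get? s).getD sentinel)
    (fun s => if (rank.get? s).isSome then "" else s)

-- ===== PRECONDITION & SPEC =====
-- Pre_ is only the set-representation invariant of the type convention: 'seen' encodes a Python set,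
-- so its List String encoding holds DISTINCT elements; no actual Python input is excluded.
def Pre_merge_column_order_py (schema_order : List String) (seen : List String) (configured : Option (List String)) : Prop :=
  seen.Nodup

instance (schema_order : List String) (seen : List String) (configured : Option (List String)) : Decidable (Pre_merge_column_order_py schema_order seen configured) := by unfold Pre_merge_column_order_py; infer_instance

def pvWitness_merge_column_order_py : List String × List String × Option (List String) :=
  (["b", "a", "d"], ["a", "c", "b", "e"], some ["c", "a"])

def Spec_merge_column_order_py (schema_order : List String) (seen : List String) (configured : Option (List String)) (out : List String) : Prop := out = merge_column_order_py_alt schema_order seen configured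
instance (schema_order : List String) (seen : List String) (configured : Option (List String)) (out : List String) : Decidable (Spec_merge_column_order_py schema_order seen configured out) := by unfold Spec_merge_column_order_py; infer_instance

-- ===== CLAIM (what is proved, stated in full; the proofs are below) =====
def Claim_equal_merge_column_order_py : Prop := ∀ (schema_order : List String) (seen : List String) (configured : Option (List String)), Dom_merge_column_order_py schema_order seen configured → Pre_merge_column_order_py schema_order seen configured → Spec_merge_column_order_py schema_order seen configured (merge_column_order_py schema_order seen configured)

-- ===== LEMMAS AND PROOFS =====

lemma pvAdd_mem {s : List String} {n : String} (h : n ∈ s) : PySem.Set.add s n = s := by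
  simp [PySem.Set.add, h]

lemma pvAdd_not_mem {s : List String} {n : String} (h : n ∉ s) : PySem.Set.add s n = s ++ [n] := by
  simp [PySem.Set.add, h]

-- accumulator-independence of A's dedup-append loop
lemma pvFoldlAdd_acc (l s : List String) :
    l.foldl PySem.Set.add s = s ++ PySem.Set.ofList (l.filter (fun n => decide (n ∉ s))) := by
  have main : ∀ (N : Nat) (l s : List String), l.length ≤ N →
      l.foldl PySem.Set.add s = s ++ PySem.Set.ofList (l.filter (fun n => decide (n ∉ s))) := by
    intro N
    induction N with
    | zero =>
      intro l s h
      have hl : l = [] := List.eq_nil_of_length_eq_zero (Nat.le_zero.mp h)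
      simp [hl, PySem.Set.ofList, PySem.Set.empty]
    | succ N ih =>
      intro l s h
      cases l with
      | nil => simp [PySem.Set.ofList, PySem.Set.empty]
      | cons n l =>
        have hlen : l.length ≤ N := by simpa using h
        by_cases hn : n ∈ s
        · have hf : (n :: l).filter (fun m => decide (m ∉ s)) = l.filter (fun m => decide (m ∉ s)) := by
            simp [hn]
          rw [List.foldl_cons, pvAdd_mem hn, ih l s hlen, hf]
        · have hf : (n :: l).filter (fun m => decide (m ∉ s)) = n :: l.filter (fun m => decide (m ∉ s)) := by
            simp [hn]
          have h1 : l.filter (fun m => decide (m ∉ s ++ [n])) = (l.filter (fun m => decide (m ∉ s))).filter (fun m => decide (m ∉ ([n] : List String))) := by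
            rw [List.filter_filter]
            apply List.filter_congr
            intro m _
            by_cases h1 : m = n <;> by_cases h2 : m ∈ s <;> simp [h1, h2]
          have hlen2 : (l.filter (fun m => decide (m ∉ s))).length ≤ N :=
            le_trans (List.length_filter_le _ _) hlen
          have h2 : PySem.Set.ofList ((n :: l).filter (fun m => decide (m ∉ s)))
              = (l.filter (fun m => decide (m ∉ s))).foldl PySem.Set.add [n] := by
            rw [hf]
            simp [PySem.Set.ofList, PySem.Set.empty]
          rw [List.foldl_cons, pvAdd_not_mem hn, ih l (s ++ [n]) hlen, h2,
            ih _ [n] hlen2, h1]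
          simp [List.append_assoc]
  exact main l.length l s le_rfl

lemma pvOfList_cons (x : String) (l : List String) :
    PySem.Set.ofList (x :: l) = x :: PySem.Set.ofList (l.filter (fun y => decide (y ≠ x))) := by
  have h0 : PySem.Set.ofList (x :: l) = l.foldl PySem.Set.add [x] := by
    simp [PySem.Set.ofList, PySem.Set.empty]
  rw [h0, pvFoldlAdd_acc]
  simp

-- filtering preserves the relative order of first occurrences
lemma pvIdxOf_filter_mono (p : String → Bool) : ∀ (l : List String) (a b : String),
    a ∈ l.filter p → b ∈ l.filter p →
    (l.filter p).idxOf a < (l.filter p).idxOf b → l.idxOf a < l.idxOf b := by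
  intro l
  induction l with
  | nil => intro a b ha; simp at ha
  | cons y l ih =>
    intro a b ha hb hlt
    have hpa : p a := by have := List.mem_filter.mp ha; simpa using this.2
    have hpb : p b := by have := List.mem_filter.mp hb; simpa using this.2
    by_cases hy : p y
    · rw [List.filter_cons_of_pos hy] at ha hb hlt
      by_cases hay : a = y
      · subst hay
        have hba : b ≠ a := by
          intro e; subst e; simp at hlt
        rw [List.idxOf_cons_self] at *
        rw [List.idxOf_cons_ne _ (by exact fun e => hba e.symm)]
        omega
      · have hba : b ≠ y := by
          intro e; subst e
          rw [List.idxOf_cons_self, List.idxOf_cons_ne _ (fun e => hay e.symm)] at hlt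
          omega
        rw [List.idxOf_cons_ne _ (fun e => hay e.symm), List.idxOf_cons_ne _ (fun e => hba e.symm)] at hlt ⊢
        have ha' : a ∈ l.filter p := by
          rcases List.mem_cons.mp ha with h | h
          · exact absurd h hay
          · exact h
        have hb' : b ∈ l.filter p := by
          rcases List.mem_cons.mp hb with h | h
          · exact absurd h hba
          · exact h
        have := ih a b ha' hb' (by omega)
        omega
    · have hay : a ≠ y := fun e => by rw [e] at hpa; exact absurd hpa (by simp [hy])
      have hby : b ≠ y := fun e => by rw [e] at hpb; exact absurd hpb (by simp [hy])
      rw [List.filter_cons_of_neg (by simpa using hy)] at ha hb hlt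
      rw [List.idxOf_cons_ne _ (fun e => hay e.symm), List.idxOf_cons_ne _ (fun e => hby e.symm)]
      have := ih a b ha hb hlt
      omega

-- A's dedup loop lists elements in order of their first occurrence
lemma pvPairwise_ofList (l : List String) :
    (PySem.Set.ofList l).Pairwise (fun a b => l.idxOf a < l.idxOf b) := by
  have main : ∀ (N : Nat) (l : List String), l.length ≤ N →
      (PySem.Set.ofList l).Pairwise (fun a b => l.idxOf a < l.idxOf b) := by
    intro N
    induction N with
    | zero =>
      intro l h
      have hl : l = [] := List.eq_nil_of_length_eq_zero (Nat.le_zero.mp h)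
      simp [hl, PySem.Set.ofList, PySem.Set.empty]
    | succ N ih =>
      intro l h
      cases l with
      | nil => simp [PySem.Set.ofList, PySem.Set.empty]
      | cons x l =>
        rw [pvOfList_cons]
        constructor
        · intro b hb
          have hb' : b ∈ l.filter (fun y => decide (y ≠ x)) := by
            simpa [PySem.Set.mem_ofList] using hb
          have hbx : b ≠ x := by simpa using (List.mem_filter.mp hb').2
          rw [List.idxOf_cons_self, List.idxOf_cons_ne _ (fun e => hbx e.symm)]
          omega
        · have hlen : (l.filter (fun y => decide (y ≠ x))).length ≤ N :=
            le_trans (List.length_filter_le _ _) (by simpa using h)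
          have hp := ih _ hlen
          refine List.Pairwise.imp_of_mem ?_ hp
          intro a b ha hb hlt
          have ha' : a ∈ l.filter (fun y => decide (y ≠ x)) := by
            simpa [PySem.Set.mem_ofList] using ha
          have hb' : b ∈ l.filter (fun y => decide (y ≠ x)) := by
            simpa [PySem.Set.mem_ofList] using hb
          have hax : a ≠ x := by simpa using (List.mem_filter.mp ha').2
          have hbx : b ≠ x := by simpa using (List.mem_filter.mp hb').2
          have := pvIdxOf_filter_mono _ l a b ha' hb' hlt
          rw [List.idxOf_cons_ne _ (fun e => hax e.symm), List.idxOf_cons_ne _ (fun e => hbx e.symm)]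
          omega
  exact main l.length l le_rfl

-- B's 'insert if absent' dict build keeps the FIRST index of every name
lemma pvGetBuild : ∀ (l : List String) (s0 : Int) (d0 : PySem.Dict String Int) (s : String),
    ((PySem.List.enumerate l s0).foldl pvRankStep d0).get? s =
      (match d0.get? s with
       | some v => some v
       | none => if s ∈ l then some (s0 + (l.idxOf s : Int)) else none) := by
  intro l
  induction l with
  | nil => intro s0 d0 s; cases h : d0.get? s <;> simp [PySem.List.enumerate, h]
  | cons n l ih =>
    intro s0 d0 s
    rw [PySem.List.enumerate_cons, List.foldl_cons]
    rw [ih]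
    cases h : d0.get? s with
    | some v =>
      have hd' : (pvRankStep d0 (s0, n)).get? s = some v := by
        unfold pvRankStep
        by_cases hn : (d0.get? n).isSome
        · simp [hn, h]
        · simp only [hn, Bool.false_eq_true, if_false]
          by_cases hsn : s = n
          · subst hsn; rw [h] at hn; simp at hn
          · rw [PySem.Dict.get?_insert_of_ne _ _ hsn, h]
      simp [hd']
    | none =>
      by_cases hsn : s = n
      · subst hsn
        have hd' : (pvRankStep d0 (s0, s)).get? s = some s0 := by
          unfold pvRankStep
          simp [h, PySem.Dict.get?_insert_self]
        simp [hd']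
      · have hd' : (pvRankStep d0 (s0, n)).get? s = none := by
          unfold pvRankStep
          by_cases hn : (d0.get? n).isSome
          · simp [hn, h]
          · simp only [hn, Bool.false_eq_true, if_false]
            rw [PySem.Dict.get?_insert_of_ne _ _ hsn, h]
        rw [hd']
        simp only [List.mem_cons]
        by_cases hsl : s ∈ l
        · rw [List.idxOf_cons_ne _ (fun e => hsn e.symm)]
          simp only [hsl, or_true, if_true]
          push_cast
          ring_nf
        · simp [hsn, hsl]

-- a Python 2-tuple sort key is a lexicographic key
lemma pvSorted2_eq_sorted_lex (xs : List String) (k1 : String → Int) (k2 : String → String) :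
    PySem.List.sorted2 xs k1 k2 = PySem.List.sorted xs (fun x => toLex (k1 x, k2 x)) := by
  simp only [PySem.List.sorted2, Bool.false_eq_true, if_false]
  rw [PySem.List.sorted_eq_foldl_insertBy]
  congr 1
  funext acc x
  congr 1
  funext a b
  have hlex : (toLex (k1 a, k2 a) < toLex (k1 b, k2 b)) ↔ (k1 a < k1 b ∨ (k1 a = k1 b ∧ k2 a < k2 b)) := Prod.Lex.lt_iff
  rcases lt_trichotomy (k1 a) (k1 b) with h | h | h
  · simp [h, hlex, not_lt_of_gt h]
  · simp [h, Prod.Lex.lt_iff]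
  · simp [hlex, h, not_lt_of_gt h, (ne_of_gt h)]

-- A's two passes are one dedup-append loop over configured++schema_order, filtered by seen
lemma pvFoldlStepA (seen : List String) (xs out : List String) :
    xs.foldl (pvStepA seen) out = (xs.filter (fun n => decide (n ∈ seen))).foldl PySem.Set.add out := by
  rw [List.foldl_filter]
  have hstep : pvStepA seen = fun (o : List String) (n : String) => if decide (n ∈ seen) = true then PySem.Set.add o n else o := by
    funext o n
    by_cases h1 : n ∈ seen
    · by_cases h2 : n ∈ o
      · simp [pvStepA, h1, h2]
      · simp [pvStepA, h1, h2]
    · simp [pvStepA, h1]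
  rw [hstep]

-- A's result, in closed form
lemma pvA_eq (schema_order : List String) (seen : List String) (configured : Option (List String)) :
    merge_column_order_py schema_order seen configured =
      PySem.Set.ofList (((configured.getD [] ++ schema_order)).filter (fun n => decide (n ∈ seen)))
        ++ PySem.List.sorted (seen.filter (fun s => decide (s ∉ PySem.Set.ofList (((configured.getD [] ++ schema_order)).filter (fun n => decide (n ∈ seen)))))) (fun s => s) := by
  have hout1 : (match configured with
      | some cfg => if cfg ≠ [] then cfg.foldl (pvStepA seen) [] else []
      | none => []) = (configured.getD []).foldl (pvStepA seen) [] := by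
    cases configured with
    | none => rfl
    | some c => cases c <;> simp
  have hout2 : schema_order.foldl (pvStepA seen) ((configured.getD []).foldl (pvStepA seen) [])
      = PySem.Set.ofList (((configured.getD [] ++ schema_order)).filter (fun n => decide (n ∈ seen))) := by
    rw [← List.foldl_append, pvFoldlStepA]
    rfl
  unfold merge_column_order_py
  simp only [hout1, hout2]

-- ===== VERDICT (by name: the statement is the Claim_ definition above) =====
theorem merge_column_order_py_spec : Claim_equal_merge_column_order_py := by
  intro schema_order seen configured _hdom hpre
  unfold Spec_merge_column_order_py
  unfold Pre_merge_column_order_py at hpre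
  -- abbreviations
  set cfg : List String := configured.getD [] with hcfgdef
  set pri : List String := cfg ++ schema_order with hpridef
  set ys : List String := pri.filter (fun n => decide (n ∈ seen)) with hysdef
  set p2 : List String := PySem.Set.ofList ys with hp2def
  set sent : Int := (cfg.length : Int) + (schema_order.length : Int) with hsentdef
  set rankD : PySem.Dict String Int :=
    (PySem.List.enumerate schema_order (cfg.length : Int)).foldl pvRankStep
      ((PySem.List.enumerate cfg 0).foldl pvRankStep PySem.Dict.empty) with hrankdef
  set k1 : String → Int := fun s => (rankD.get? s).getD sent with hk1def
  set k2 : String → String := fun s => if (rankD.get? s).isSome then "" else s with hk2def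
  set key : String → Lex (Int × String) := fun s => toLex (k1 s, k2 s) with hkeydef
  -- the rank dict, in closed form
  have hrank : ∀ s : String, rankD.get? s =
      (if s ∈ cfg then some ((cfg.idxOf s : Nat) : Int)
       else if s ∈ schema_order then some ((cfg.length : Int) + (schema_order.idxOf s : Int)) else none) := by
    intro s
    rw [hrankdef, pvGetBuild, pvGetBuild]
    have hemp : (PySem.Dict.empty : PySem.Dict String Int).get? s = none := rfl
    rw [hemp]
    by_cases h1 : s ∈ cfg
    · simp [h1]
    · simp [h1]
  -- key values on and off pri
  have hk1mem : ∀ s ∈ pri, k1 s = ((pri.idxOf s : Nat) : Int) := by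
    intro s hs
    rw [hk1def]
    simp only [hrank s]
    rw [hpridef] at hs ⊢
    rw [List.idxOf_append]
    by_cases h1 : s ∈ cfg
    · simp [h1]
    · have h2 : s ∈ schema_order := by
        rcases List.mem_append.mp hs with h | h
        · exact absurd h h1
        · exact h
      simp [h1, h2]
      ring
  have hk1out : ∀ s, s ∉ pri → k1 s = sent := by
    intro s hs
    have h1 : s ∉ cfg := fun h => hs (by rw [hpridef]; exact List.mem_append_left _ h)
    have h2 : s ∉ schema_order := fun h => hs (by rw [hpridef]; exact List.mem_append_right _ h)
    rw [hk1def]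
    simp [hrank s, h1, h2]
  have hk2out : ∀ s, s ∉ pri → k2 s = s := by
    intro s hs
    have h1 : s ∉ cfg := fun h => hs (by rw [hpridef]; exact List.mem_append_left _ h)
    have h2 : s ∉ schema_order := fun h => hs (by rw [hpridef]; exact List.mem_append_right _ h)
    rw [hk2def]
    simp [hrank s, h1, h2]
  -- members of p2 = pri ∩ seen
  have hmemp2 : ∀ x, x ∈ p2 ↔ (x ∈ pri ∧ x ∈ seen) := by
    intro x
    rw [hp2def, PySem.Set.mem_ofList, hysdef, List.mem_filter]
    simp
  set rest : List String := PySem.List.sorted (seen.filter (fun s => decide (s ∉ p2))) (fun s => s) with hrestdef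
  have hrestperm : rest.Perm (seen.filter (fun s => decide (s ∉ p2))) :=
    PySem.List.sorted_perm _ _ _
  have hmemrest : ∀ x ∈ rest, x ∈ seen ∧ x ∉ pri := by
    intro x hx
    have hx' := hrestperm.mem_iff.mp hx
    have h1 := List.mem_filter.mp hx'
    refine ⟨h1.1, fun hp => ?_⟩
    have : x ∉ p2 := by simpa using h1.2
    exact this ((hmemp2 x).mpr ⟨hp, h1.1⟩)
  -- permutation: A's output is a rearrangement of seen
  have hnodup_p2 : p2.Nodup := by rw [hp2def]; exact PySem.Set.nodup_ofList _
  have hp2perm : p2.Perm (seen.filter (fun s => decide (s ∈ p2))) := by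
    refine (List.perm_ext_iff_of_nodup hnodup_p2 (hpre.filter _)).mpr ?_
    intro x
    rw [List.mem_filter]
    constructor
    · intro hx
      exact ⟨((hmemp2 x).mp hx).2, by simpa using hx⟩
    · intro hx
      simpa using hx.2
  have hperm : (p2 ++ rest).Perm seen := by
    refine List.Perm.trans (List.Perm.append hp2perm hrestperm) ?_
    have hneg : (seen.filter (fun s => decide (s ∉ p2))) = seen.filter (fun s => !(decide (s ∈ p2))) := by
      apply List.filter_congr; intro m _; simp
    rw [hneg]
    exact List.filter_append_perm _ seen
  -- pairwise: A's output is strictly increasing under B's sort key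
  have hkiff : ∀ a b : String, (key a < key b ↔ (k1 a < k1 b ∨ (k1 a = k1 b ∧ k2 a < k2 b))) := by
    intro a b
    rw [hkeydef]
    exact Prod.Lex.lt_iff
  have hpair_p2 : p2.Pairwise (fun a b => key a < key b) := by
    have h0 : p2.Pairwise (fun a b => ys.idxOf a < ys.idxOf b) := by
      rw [hp2def]; exact pvPairwise_ofList ys
    refine List.Pairwise.imp_of_mem ?_ h0
    intro a b ha hb hlt
    have ha' : a ∈ ys := by rw [hp2def, PySem.Set.mem_ofList] at ha; exact ha
    have hb' : b ∈ ys := by rw [hp2def, PySem.Set.mem_ofList] at hb; exact hb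
    have hpri : pri.idxOf a < pri.idxOf b := by
      rw [hysdef] at ha' hb' hlt
      exact pvIdxOf_filter_mono _ pri a b ha' hb' hlt
    have hapri : a ∈ pri := ((hmemp2 a).mp ha).1
    have hbpri : b ∈ pri := ((hmemp2 b).mp hb).1
    rw [hkiff]
    left
    rw [hk1mem a hapri, hk1mem b hbpri]
    exact_mod_cast hpri
  have hnodup_rest : rest.Nodup := hrestperm.nodup_iff.mpr (hpre.filter _)
  have hpair_rest : rest.Pairwise (fun a b => key a < key b) := by
    have hle : rest.Pairwise (fun a b => a ≤ b) := by
      have := PySem.List.sorted_pairwise (seen.filter (fun s => decide (s ∉ p2))) (fun s => s)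
      simpa [hrestdef] using this
    have hne : rest.Pairwise (fun a b => a ≠ b) := hnodup_rest
    have hcomb := hle.and hne
    refine List.Pairwise.imp_of_mem ?_ hcomb
    intro a b ha hb hab
    have hna : a ∉ pri := (hmemrest a ha).2
    have hnb : b ∉ pri := (hmemrest b hb).2
    rw [hkiff]
    right
    refine ⟨by rw [hk1out a hna, hk1out b hnb], ?_⟩
    rw [hk2out a hna, hk2out b hnb]
    exact lt_of_le_of_ne hab.1 hab.2
  have hpair_cross : ∀ a ∈ p2, ∀ b ∈ rest, key a < key b := by
    intro a ha b hb
    have hapri : a ∈ pri := ((hmemp2 a).mp ha).1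
    have hnb : b ∉ pri := (hmemrest b hb).2
    rw [hkiff]
    left
    rw [hk1mem a hapri, hk1out b hnb]
    have hlt : pri.idxOf a < pri.length := List.idxOf_lt_length_of_mem hapri
    have hlen : ((pri.length : Nat) : Int) = sent := by
      rw [hpridef, hsentdef]
      push_cast [List.length_append]
      ring
    rw [← hlen]
    exact_mod_cast hlt
  have hpairs : (p2 ++ rest).Pairwise (fun a b => key a < key b) := by
    rw [List.pairwise_append]
    exact ⟨hpair_p2, hpair_rest, hpair_cross⟩
  -- conclude
  have hA := pvA_eq schema_order seen configured
  have hB : merge_column_order_py_alt schema_order seen configured = PySem.List.sorted seen key := by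
    show PySem.List.sorted2 seen k1 k2 = PySem.List.sorted seen key
    rw [hkeydef]
    exact pvSorted2_eq_sorted_lex seen k1 k2
  rw [hB, hA]
  rw [← hcfgdef, ← hpridef, ← hysdef, ← hp2def, ← hrestdef]
  exact (PySem.List.sorted_eq_of_perm_of_pairwise_lt seen (p2 ++ rest) key hperm hpairs).symm
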